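-- pv_equiv track=rewrite | github.com/dantealegria1/Proyecto_Laberinto | Algoritmos_Busqueda/nuevoLaberinto_DFS_funcionandp.py | obtener_vecinos_solucion
-- ===== SOURCE A (Python) =====
-- def obtener_vecinos_solucion(laberinto, i, j, visitados):
--
--   vecinos = []
--
--   if i > 1 and [i-2, j] not in visitados:
--     vecinos.append([i-2, j])
--
--   if i < len(laberinto)-2 and [i+2, j] not in visitados:
--     vecinos.append([i+2, j])
--
--   if j > 1 and [i, j-2] not in visitados:
--     vecinos.append([i, j-2])
--
--   if j < len(laberinto[0])-2 and [i, j+2] not in visitados: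
--     vecinos.append([i, j+2])
--
--   vecinos_solucion = []
--
--   # Comprobar si entre el actual y el vecino hay un 1
--   for vecino in vecinos:
--     if vecino[0] == i and vecino[1] == j + 2 :
--       if laberinto[i][j+1] == '1':
--         vecinos_solucion.append(vecino)
--     elif vecino[0] == i and vecino[1] == j - 2:
--       if laberinto[i][j-1] == '1':
--         vecinos_solucion.append(vecino)
--     elif vecino[0] == i + 2 and vecino[1] == j:
--       if laberinto[i+1][j] == '1':
--         vecinos_solucion.append(vecino)
--     elif vecino[0] == i - 2 and vecino[1] == j:
--       if laberinto[i-1][j] == '1':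
--         vecinos_solucion.append(vecino)
--
--   return vecinos_solucion
-- ===== SOURCE B (Python) =====
-- def obtener_vecinos_solucion(laberinto, i, j, visitados):
--     # Back-to-front construction: each step conses its neighbor onto the rest,
--     # evaluated right-to-left, so no intermediate candidate list and no loop.
--     n = len(laberinto)
--     m = len(laberinto[0])
--
--     def paso(ti, tj, wi, wj, dentro, resto):
--         if dentro and [ti, tj] not in visitados and laberinto[wi][wj] == '1':
--             return [[ti, tj]] + resto
--         return resto
--
--     return paso(i - 2, j, i - 1, j, i > 1,
--            paso(i + 2, j, i + 1, j, i < n - 2,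
--            paso(i, j - 2, i, j - 1, j > 1,
--            paso(i, j + 2, i, j + 1, j < m - 2,
--            []))))
-- ===== Notes on version B (the rewrite author's own statement) =====
-- stated objective: simpler
-- what changed: B drops A's two-phase structure (first build a candidate list with four ifs, then a loop that re-dispatches each candidate by comparing its coordinates back to i,j to pick the wall cell) and instead builds the answer back-to-front by four nested calls of one step function that is given its target and wall coordinates directly - no intermediate vecinos list, no loop, no coordinate dispatch.
import Mathlib
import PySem

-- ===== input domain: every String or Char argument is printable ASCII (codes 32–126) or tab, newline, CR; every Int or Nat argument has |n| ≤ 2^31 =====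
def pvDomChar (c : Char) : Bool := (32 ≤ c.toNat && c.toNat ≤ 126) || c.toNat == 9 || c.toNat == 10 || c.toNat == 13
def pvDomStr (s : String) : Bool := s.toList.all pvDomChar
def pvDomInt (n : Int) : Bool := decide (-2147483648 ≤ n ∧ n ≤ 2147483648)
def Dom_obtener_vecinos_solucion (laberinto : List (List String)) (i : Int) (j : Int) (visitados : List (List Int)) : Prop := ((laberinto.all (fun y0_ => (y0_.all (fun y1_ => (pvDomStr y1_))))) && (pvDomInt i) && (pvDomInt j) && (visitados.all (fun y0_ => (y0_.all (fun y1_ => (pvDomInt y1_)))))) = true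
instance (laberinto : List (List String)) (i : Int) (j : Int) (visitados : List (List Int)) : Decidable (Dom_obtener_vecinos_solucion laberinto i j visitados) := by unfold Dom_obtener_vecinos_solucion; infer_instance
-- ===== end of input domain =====

-- B replaces A's two-phase structure (candidate list, then a loop re-dispatching each candidate by
-- coordinate comparison) with a back-to-front nest of one step function given its wall cell directly
-- (objective: simpler).
-- ===== PORT A =====
-- laberinto[r][c] with Python indexing (negative wrap, none on IndexError); Pre_ keeps the
-- accesses in range, so the "" default is never compared.
def pvCell (laberinto : List (List String)) (r c : Int) : String :=
  (((PySem.List.pyGet? laberinto r).bind (fun row => PySem.List.pyGet? row c)).getD "")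

def obtener_vecinos_solucion (laberinto : List (List String)) (i : Int) (j : Int) (visitados : List (List Int)) : List (List Int) :=
  let vecinos : List (List Int) :=
    ((((([] : List (List Int)) ++
      (if i > 1 ∧ [i-2, j] ∉ visitados then [[i-2, j]] else [])) ++
      (if i < (laberinto.length : Int) - 2 ∧ [i+2, j] ∉ visitados then [[i+2, j]] else [])) ++
      (if j > 1 ∧ [i, j-2] ∉ visitados then [[i, j-2]] else [])) ++
      (if j < (((PySem.List.pyGet? laberinto 0).getD []).length : Int) - 2 ∧ [i, j+2] ∉ visitados then [[i, j+2]] else []))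
  vecinos.foldl (fun acc vecino =>
    let v0 := (PySem.List.pyGet? vecino 0).getD 0
    let v1 := (PySem.List.pyGet? vecino 1).getD 0
    if v0 = i ∧ v1 = j + 2 then
      (if pvCell laberinto i (j+1) = "1" then acc ++ [vecino] else acc)
    else if v0 = i ∧ v1 = j - 2 then
      (if pvCell laberinto i (j-1) = "1" then acc ++ [vecino] else acc)
    else if v0 = i + 2 ∧ v1 = j then
      (if pvCell laberinto (i+1) j = "1" then acc ++ [vecino] else acc)
    else if v0 = i - 2 ∧ v1 = j then
      (if pvCell laberinto (i-1) j = "1" then acc ++ [vecino] else acc)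
    else acc) []

-- ===== PORT B =====
-- B's step function `paso`: conses its neighbor onto the already-built rest of the answer.
def pvPaso (laberinto : List (List String)) (visitados : List (List Int))
    (ti tj wi wj : Int) (dentro : Bool) (resto : List (List Int)) : List (List Int) :=
  if dentro = true ∧ [ti, tj] ∉ visitados ∧ pvCell laberinto wi wj = "1"
  then [ti, tj] :: resto else resto

def obtener_vecinos_solucion_alt (laberinto : List (List String)) (i : Int) (j : Int) (visitados : List (List Int)) : List (List Int) :=
  let n : Int := laberinto.length
  let m : Int := (((PySem.List.pyGet? laberinto 0).getD []).length : Int)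
  pvPaso laberinto visitados (i-2) j (i-1) j (decide (i > 1))
    (pvPaso laberinto visitados (i+2) j (i+1) j (decide (i < n - 2))
      (pvPaso laberinto visitados i (j-2) i (j-1) (decide (j > 1))
        (pvPaso laberinto visitados i (j+2) i (j+1) (decide (j < m - 2))
          [])))

-- ===== PRECONDITION & SPEC =====
-- Pre_ excludes exactly the inputs on which A raises IndexError: the empty maze (len(laberinto[0])
-- is always evaluated) and inputs where a taken direction's between-wall cell access is out of range.
def pvCellOk (laberinto : List (List String)) (r c : Int) : Bool :=
  ((PySem.List.pyGet? laberinto r).bind (fun row => PySem.List.pyGet? row c)).isSome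

def Pre_obtener_vecinos_solucion (laberinto : List (List String)) (i : Int) (j : Int) (visitados : List (List Int)) : Prop :=
  laberinto ≠ [] ∧
  ((i > 1 ∧ [i-2, j] ∉ visitados) → pvCellOk laberinto (i-1) j = true) ∧
  ((i < (laberinto.length : Int) - 2 ∧ [i+2, j] ∉ visitados) → pvCellOk laberinto (i+1) j = true) ∧
  ((j > 1 ∧ [i, j-2] ∉ visitados) → pvCellOk laberinto i (j-1) = true) ∧
  ((j < (((PySem.List.pyGet? laberinto 0).getD []).length : Int) - 2 ∧ [i, j+2] ∉ visitados) → pvCellOk laberinto i (j+1) = true)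
instance (laberinto : List (List String)) (i : Int) (j : Int) (visitados : List (List Int)) : Decidable (Pre_obtener_vecinos_solucion laberinto i j visitados) := by unfold Pre_obtener_vecinos_solucion; infer_instance

def pvWitness_obtener_vecinos_solucion : List (List String) × Int × Int × List (List Int) :=
  ([["1","1","1"],["1","1","1"],["1","1","1"]], 0, 0, [])

def Spec_obtener_vecinos_solucion (laberinto : List (List String)) (i : Int) (j : Int) (visitados : List (List Int)) (out : List (List Int)) : Prop := out = obtener_vecinos_solucion_alt laberinto i j visitados
instance (laberinto : List (List String)) (i : Int) (j : Int) (visitados : List (List Int)) (out : List (List Int)) : Decidable (Spec_obtener_vecinos_solucion laberinto i j visitados out) := by unfold Spec_obtener_vecinos_solucion; infer_instance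

-- ===== CLAIM (what is proved, stated in full; the proofs are below) =====
def Claim_equal_obtener_vecinos_solucion : Prop := ∀ (laberinto : List (List String)) (i : Int) (j : Int) (visitados : List (List Int)), Dom_obtener_vecinos_solucion laberinto i j visitados → Pre_obtener_vecinos_solucion laberinto i j visitados → Spec_obtener_vecinos_solucion laberinto i j visitados (obtener_vecinos_solucion laberinto i j visitados)

-- ===== LEMMAS AND PROOFS =====
def pvDispA (lab : List (List String)) (i j : Int) (vecino : List Int) : List (List Int) :=
  let v0 := (PySem.List.pyGet? vecino 0).getD 0
  let v1 := (PySem.List.pyGet? vecino 1).getD 0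
  if v0 = i ∧ v1 = j + 2 then (if pvCell lab i (j+1) = "1" then [vecino] else [])
  else if v0 = i ∧ v1 = j - 2 then (if pvCell lab i (j-1) = "1" then [vecino] else [])
  else if v0 = i + 2 ∧ v1 = j then (if pvCell lab (i+1) j = "1" then [vecino] else [])
  else if v0 = i - 2 ∧ v1 = j then (if pvCell lab (i-1) j = "1" then [vecino] else [])
  else []

-- a guarded singleton chunk: A's "membership filter then wall check" equals one conjunction
theorem pvChunk (g m w : Prop) [Decidable g] [Decidable m] [Decidable w] (v : List Int) :
    (if g ∧ m then (if w then [v] else ([] : List (List Int))) else []) =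
    (if decide g = true ∧ m ∧ w then [v] else []) := by
  by_cases hg : g <;> by_cases hm : m <;> by_cases hw : w <;> simp [hg, hm, hw]

-- B's step in appended-chunk form
theorem pvPaso_eq (lab : List (List String)) (vis : List (List Int)) (ti tj wi wj : Int)
    (d : Bool) (r : List (List Int)) :
    pvPaso lab vis ti tj wi wj d r =
    (if d = true ∧ [ti, tj] ∉ vis ∧ pvCell lab wi wj = "1" then [[ti, tj]] else []) ++ r := by
  unfold pvPaso; split_ifs <;> simp

set_option maxHeartbeats 1000000 in
theorem obtener_vecinos_solucion_spec : Claim_equal_obtener_vecinos_solucion := by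
  intro lab i j vis _ _
  unfold Spec_obtener_vecinos_solucion obtener_vecinos_solucion obtener_vecinos_solucion_alt
  have hA : ∀ (l : List (List Int)),
      l.foldl (fun acc vecino =>
        let v0 := (PySem.List.pyGet? vecino 0).getD 0
        let v1 := (PySem.List.pyGet? vecino 1).getD 0
        if v0 = i ∧ v1 = j + 2 then
          (if pvCell lab i (j+1) = "1" then acc ++ [vecino] else acc)
        else if v0 = i ∧ v1 = j - 2 then
          (if pvCell lab i (j-1) = "1" then acc ++ [vecino] else acc)
        else if v0 = i + 2 ∧ v1 = j then
          (if pvCell lab (i+1) j = "1" then acc ++ [vecino] else acc)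
        else if v0 = i - 2 ∧ v1 = j then
          (if pvCell lab (i-1) j = "1" then acc ++ [vecino] else acc)
        else acc) [] = l.flatMap (pvDispA lab i j) := by
    intro l
    refine Eq.trans (PySem.List.foldl_congr_mem
      (g := fun (acc : List (List Int)) (vecino : List Int) => acc ++ pvDispA lab i j vecino) _ _ _ ?_) ?_
    · intro acc x _; simp only [pvDispA]; split_ifs <;> simp
    · rw [PySem.List.foldl_append_eq_flatMap, List.nil_append]
  rw [hA]
  have n1 : i - 2 ≠ i := by omega
  have n2 : i + 2 ≠ i := by omega
  have n3 : j - 2 ≠ j + 2 := by omega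
  have n5 : i - 2 ≠ i + 2 := by omega
  have dU : pvDispA lab i j [i-2, j] = (if pvCell lab (i-1) j = "1" then [[i-2, j]] else []) := by
    simp [pvDispA, n1, n5]
  have dD : pvDispA lab i j [i+2, j] = (if pvCell lab (i+1) j = "1" then [[i+2, j]] else []) := by
    simp [pvDispA, n2]
  have dL : pvDispA lab i j [i, j-2] = (if pvCell lab i (j-1) = "1" then [[i, j-2]] else []) := by
    simp [pvDispA, n3]
  have dR : pvDispA lab i j [i, j+2] = (if pvCell lab i (j+1) = "1" then [[i, j+2]] else []) := by
    simp [pvDispA]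
  simp only [List.nil_append, List.flatMap_append, List.flatMap_cons, List.flatMap_nil,
    apply_ite (List.flatMap (pvDispA lab i j)), dU, dD, dL, dR, List.append_nil,
    pvChunk, List.append_assoc, pvPaso_eq]

-- ===== VERDICT (by name: the statement is the Claim_ definition above) =====
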